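-- pv_equiv track=rewrite | github.com/woowacourse-study/2022-lv3-algorithm-study | out/production/2022-lv3-algorithm-study/1254_leo_python.py | solution
-- ===== SOURCE A (Python) =====
-- def solution(words):
--     queue = list(map(str, words))
--     result = 0
--     while queue:
--         word = queue.pop(0)
--         if not queue:
--             return result * 2 + 1
--         if word == queue[-1]:
--             queue.pop()
--         result += 1
--     return result * 2
-- ===== SOURCE B (Python) =====
-- def solution(words):
--     i, j = 0, len(words) - 1
--     result = 0
--     while i <= j:
--         if i == j:
--             return result * 2 + 1
--         if words[i] == words[j]:
--             j -= 1
--         i += 1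
--         result += 1
--     return result * 2
-- ===== Notes on version B (the rewrite author's own statement) =====
-- stated objective: faster
-- what changed: Replaces the mutated queue with O(n) pop(0)/pop() per step by two index pointers into the untouched list, removing all element shifting.
import Mathlib
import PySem

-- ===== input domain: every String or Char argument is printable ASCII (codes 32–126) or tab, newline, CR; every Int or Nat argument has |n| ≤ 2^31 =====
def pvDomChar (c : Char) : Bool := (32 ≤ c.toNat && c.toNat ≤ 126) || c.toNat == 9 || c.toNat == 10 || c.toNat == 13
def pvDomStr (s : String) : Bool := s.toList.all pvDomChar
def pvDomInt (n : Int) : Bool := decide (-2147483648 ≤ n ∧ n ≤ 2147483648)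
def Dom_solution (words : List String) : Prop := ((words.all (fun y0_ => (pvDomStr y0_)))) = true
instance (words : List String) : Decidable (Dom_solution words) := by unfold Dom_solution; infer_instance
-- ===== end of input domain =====

-- B replaces A's shrinking queue (pop(0)/pop(), O(n) each) by two index pointers over the unchanged list: O(n) total.

-- ===== PORT A =====
-- the while loop over the mutating queue: pop(0) = head, queue[-1] = pyGet? (-1), queue.pop() = dropLast
def solutionGo (queue : List String) (result : Int) : Int :=
  match queue with
  | [] => result * 2
  | word :: rest =>
    if rest = [] then result * 2 + 1
    else if some word = PySem.List.pyGet? rest (-1) then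
      solutionGo rest.dropLast (result + 1)
    else
      solutionGo rest (result + 1)
termination_by queue.length
decreasing_by all_goals simp [List.length_dropLast]

-- list(map(str, words)) is the identity on a list of strings
def solution (words : List String) : Int := solutionGo words 0

-- ===== PORT B =====
-- words[i]/words[j] are always in range when read (0 ≤ i ≤ j < len), so pyGet? comparison is exact
def solutionAltGo (words : List String) (i j result : Int) : Int :=
  if i ≤ j then
    if i = j then result * 2 + 1
    else if PySem.List.pyGet? words i = PySem.List.pyGet? words j then
      solutionAltGo words (i + 1) (j - 1) (result + 1)
    else
      solutionAltGo words (i + 1) j (result + 1)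
  else result * 2
termination_by (j + 1 - i).toNat
decreasing_by all_goals omega

def solution_alt (words : List String) : Int :=
  solutionAltGo words 0 ((words.length : Int) - 1) 0

-- ===== PRECONDITION & SPEC =====
def Spec_solution (words : List String) (out : Int) : Prop := out = solution_alt words
instance (words : List String) (out : Int) : Decidable (Spec_solution words out) := by unfold Spec_solution; infer_instance

-- ===== CLAIM (what is proved, stated in full; the proofs are below) =====
def Claim_equal_solution : Prop := ∀ (words : List String), Dom_solution words → Spec_solution words (solution words)

-- ===== LEMMAS AND PROOFS =====

-- the pointer loop computes A's queue loop on the slice words[i..j]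
lemma bridge : ∀ (n : Nat) (words : List String) (i j r : Int), 0 ≤ i → j < (words.length : Int) →
    (j + 1 - i).toNat = n →
    solutionAltGo words i j r = solutionGo ((words.drop i.toNat).take (j + 1 - i).toNat) r := by
  intro n
  induction n using Nat.strong_induction_on with
  | _ n ih =>
    intro words i j r hi hj hn
    rw [solutionAltGo]
    by_cases hij : i ≤ j
    · by_cases heq : i = j
      · subst heq
        have h1 : (i + 1 - i).toNat = 1 := by omega
        have hi' : i.toNat < words.length := by omega
        rw [List.drop_eq_getElem_cons hi', h1]
        simp only [List.take_succ_cons, List.take_zero]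
        rw [solutionGo]
        simp
      · have hlt : i < j := lt_of_le_of_ne hij heq
        have hi' : i.toNat < words.length := by omega
        have hj' : j.toNat < words.length := by omega
        have hk : (j + 1 - i).toNat = (j - i).toNat + 1 := by omega
        rw [List.drop_eq_getElem_cons hi', hk, List.take_succ_cons]
        set rest := (words.drop (i.toNat + 1)).take (j - i).toNat with hrest
        have hlen : rest.length = (j - i).toNat := by
          rw [hrest]; simp; omega
        have hne : rest ≠ [] := by
          intro h; rw [h] at hlen; simp at hlen; omega
        have hlast : rest.getLast? = some words[j.toNat] := by
          rw [List.getLast?_eq_getElem?, hlen, hrest, List.getElem?_take_of_lt (by omega),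
            List.getElem?_drop, show i.toNat + 1 + ((j - i).toNat - 1) = j.toNat from by omega,
            List.getElem?_eq_getElem hj']
        have hgi : PySem.List.pyGet? words i = some words[i.toNat] :=
          PySem.List.pyGet?_eq_some_getElem words (by omega) (by omega)
        have hgj : PySem.List.pyGet? words j = some words[j.toNat] :=
          PySem.List.pyGet?_eq_some_getElem words (by omega) (by omega)
        rw [solutionGo]
        simp only [hne, if_neg heq, if_pos hij, ite_false, PySem.List.pyGet?_neg_one,
          hlast, hgi, hgj]
        by_cases hw : words[i.toNat] = words[j.toNat]
        · simp only [hw, if_true]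
          have hdl : rest.dropLast = (words.drop (i.toNat + 1)).take ((j - i).toNat - 1) := by
            rw [List.dropLast_eq_take, hlen, hrest, List.take_take]
            congr 1
            omega
          rw [hdl]
          have := ih ((j - i).toNat - 1) (by omega) words (i + 1) (j - 1) (r + 1)
            (by omega) (by omega) (by omega)
          rw [show (i + 1).toNat = i.toNat + 1 from by omega,
            show (j - 1 + 1 - (i + 1)).toNat = (j - i).toNat - 1 from by omega] at this
          exact this
        · rw [if_neg (by simpa using hw), if_neg (by simpa using hw)]
          have := ih ((j - i).toNat) (by omega) words (i + 1) j (r + 1)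
            (by omega) (by omega) (by omega)
          rw [show (i + 1).toNat = i.toNat + 1 from by omega,
            show (j + 1 - (i + 1)).toNat = (j - i).toNat from by omega] at this
          exact this
    · have h0 : (j + 1 - i).toNat = 0 := by omega
      rw [h0, List.take_zero, solutionGo]
      simp [hij]

-- ===== VERDICT (by name: the statement is the Claim_ definition above) =====
theorem solution_spec : Claim_equal_solution := by
  intro words _
  show solution words = solution_alt words
  unfold solution solution_alt
  cases hw : words with
  | nil => rw [solutionGo, solutionAltGo]; norm_num
  | cons a as =>
    have hlen : 0 < words.length := by rw [hw]; simp
    rw [← hw]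
    rw [bridge words.length words 0 ((words.length : Int) - 1) 0 le_rfl (by omega) (by omega)]
    congr 1
    have : ((words.length : Int) - 1 + 1 - 0).toNat = words.length := by omega
    rw [this]
    simp
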